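-- pv_equiv track=rewrite | github.com/Moremar/advent_of_code | aoc_2024/day21/script.py | solve
-- ===== SOURCE A (Python) =====
-- POSITIONS = {
--     '7': (0, 0), '8': (0, 1), '9': (0, 2),
--     '4': (1, 0), '5': (1, 1), '6': (1, 2),
--     '1': (2, 0), '2': (2, 1), '3': (2, 2),
--                  '0': (3, 1), 'A': (3, 2),
--                  '^': (3, 1),
--     '<': (4, 0), 'v': (4, 1), '>': (4, 2)
-- }
--
-- def cache_robot_moves():
--     """Cache the number of moves at a given depth to press a button from any position"""
--     # it takes a single button press to push any button at depth 0, no matter the previous button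
--     cache = {(x, y, 0): 1 for x in POSITIONS for y in POSITIONS}
--     for depth in range(1, 27):
--         for from_key in POSITIONS:
--             for to_key in POSITIONS:
--                 dx, dy = POSITIONS[to_key][0] - POSITIONS[from_key][0], \
--                          POSITIONS[to_key][1] - POSITIONS[from_key][1]
--                 if dx == 0:
--                     sequence = ('>' if dy > 0 else '<') * abs(dy) + 'A'
--                 elif dy == 0:
--                     sequence = ('v' if dx > 0 else '^') * abs(dx) + 'A'
--                 # (3, 0) is not a valid position, so we do not allow to go over it
--                 elif (POSITIONS[from_key][0], POSITIONS[to_key][1]) == (3, 0):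
--                     sequence = ('v' if dx > 0 else '^') * abs(dx) \
--                                + ('>' if dy > 0 else '<') * abs(dy) + 'A'
--                 elif (POSITIONS[to_key][0], POSITIONS[from_key][1]) == (3, 0):
--                     sequence = ('>' if dy > 0 else '<') * abs(dy) \
--                                + ('v' if dx > 0 else '^') * abs(dx) + 'A'
--                 # when both horizontal and vertical moves are required and both order are valid,
--                 # it is optimal to start with the horizontal move only if it goes to the left
--                 elif dy < 0:
--                     sequence = ('>' if dy > 0 else '<') * abs(dy) \
--                                + ('v' if dx > 0 else '^') * abs(dx) + 'A'
--                 else: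
--                     sequence = ('v' if dx > 0 else '^') * abs(dx) \
--                                + ('>' if dy > 0 else '<') * abs(dy) + 'A'
--
--                 # count the number of moves required to execute this sequence of buttons
--                 count, prev = 0, 'A'
--                 for c in sequence:
--                     count += cache[(prev, c, depth - 1)]
--                     prev = c
--                 cache[(from_key, to_key, depth)] = count
--     return cache
--
-- def solve(codes, depth):
--     """Solve part 2"""
--     moves_cache = cache_robot_moves()
--     res = 0
--     for code in codes:
--         count, prev = 0, 'A'
--         for c in code:
--             count += moves_cache[(prev, c, depth)]
--             prev = c
--         res += count * int(code[:-1])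
--     return res
-- ===== SOURCE B (Python) =====
-- POSITIONS = {
--     '7': (0, 0), '8': (0, 1), '9': (0, 2),
--     '4': (1, 0), '5': (1, 1), '6': (1, 2),
--     '1': (2, 0), '2': (2, 1), '3': (2, 2),
--                  '0': (3, 1), 'A': (3, 2),
--                  '^': (3, 1),
--     '<': (4, 0), 'v': (4, 1), '>': (4, 2)
-- }
--
-- def cost(from_key, to_key, depth, memo):
--     """Presses needed at this depth to move from from_key to to_key and press it,
--     computed top-down and memoized in `memo` (only what is actually needed)."""
--     if depth == 0:
--         return 1
--     key = (from_key, to_key, depth)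
--     if key in memo:
--         return memo[key]
--     (fx, fy), (tx, ty) = POSITIONS[from_key], POSITIONS[to_key]
--     dx, dy = tx - fx, ty - fy
--     vert = ('v' if dx > 0 else '^') * abs(dx)
--     horiz = ('>' if dy > 0 else '<') * abs(dy)
--     # never pass over the gap at (3, 0); otherwise horizontal first only when going left
--     if dx == 0:
--         seq = horiz + 'A'
--     elif dy == 0 or (fx, ty) == (3, 0):
--         seq = vert + horiz + 'A'
--     elif (tx, fy) == (3, 0) or dy < 0:
--         seq = horiz + vert + 'A'
--     else:
--         seq = vert + horiz + 'A'
--     total, prev = 0, 'A'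
--     for c in seq:
--         total += cost(prev, c, depth - 1, memo)
--         prev = c
--     memo[key] = total
--     return total
--
-- def solve(codes, depth):
--     """Solve part 2"""
--     memo = {}
--     res = 0
--     for code in codes:
--         count, prev = 0, 'A'
--         for c in code:
--             count += cost(prev, c, depth, memo)
--             prev = c
--         res += count * int(code[:-1])
--     return res
-- ===== Notes on version B (the rewrite author's own statement) =====
-- stated objective: alternative
-- what changed: Replaces the bottom-up construction of the full 27-depth move-count table (cache_robot_moves, all 15x15 key pairs at every depth 0..26) with a top-down recursive cost(from,to,depth,memo) that computes, and memoizes, only the entries actually reachable from the given codes at the given depth.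
import Mathlib
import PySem

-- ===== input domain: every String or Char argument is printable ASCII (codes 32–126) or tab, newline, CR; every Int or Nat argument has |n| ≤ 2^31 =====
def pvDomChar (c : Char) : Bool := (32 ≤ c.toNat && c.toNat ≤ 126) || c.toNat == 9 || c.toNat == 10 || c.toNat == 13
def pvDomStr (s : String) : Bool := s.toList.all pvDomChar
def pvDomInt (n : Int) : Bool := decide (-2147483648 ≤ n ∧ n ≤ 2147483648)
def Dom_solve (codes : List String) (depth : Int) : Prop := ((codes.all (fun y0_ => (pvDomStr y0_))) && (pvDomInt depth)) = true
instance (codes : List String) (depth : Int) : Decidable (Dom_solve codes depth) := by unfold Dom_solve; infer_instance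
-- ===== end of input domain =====

-- B replaces A's bottom-up construction of the complete 27-depth move-count table by a
-- top-down memoized recursion that computes only the entries actually needed (objective:
-- alternative decomposition; equal return values proved below).

-- ===== PORT A =====
-- POSITIONS table, shared by both ports (both Python files contain the identical dict literal)
def pvPositions : PySem.Dict Char (Int × Int) :=
  PySem.Dict.ofList
    [('7',(0,0)),('8',(0,1)),('9',(0,2)),
     ('4',(1,0)),('5',(1,1)),('6',(1,2)),
     ('1',(2,0)),('2',(2,1)),('3',(2,2)),
     ('0',(3,1)),('A',(3,2)),
     ('^',(3,1)),
     ('<',(4,0)),('v',(4,1)),('>',(4,2))]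

-- the `sequence` computed in A's inner loop body; POSITIONS[k] is getD — exact here because
-- A only evaluates it for keys iterated from POSITIONS itself
def pvSeqA (from_key to_key : Char) : List Char :=
  let dx : Int := (pvPositions.getD to_key (0,0)).1 - (pvPositions.getD from_key (0,0)).1
  let dy : Int := (pvPositions.getD to_key (0,0)).2 - (pvPositions.getD from_key (0,0)).2
  if dx = 0 then
    PySem.List.pyRepeat [if dy > 0 then '>' else '<'] |dy| ++ ['A']
  else if dy = 0 then
    PySem.List.pyRepeat [if dx > 0 then 'v' else '^'] |dx| ++ ['A']
  else if ((pvPositions.getD from_key (0,0)).1, (pvPositions.getD to_key (0,0)).2) = ((3:Int), (0:Int)) then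
    PySem.List.pyRepeat [if dx > 0 then 'v' else '^'] |dx| ++ (PySem.List.pyRepeat [if dy > 0 then '>' else '<'] |dy| ++ ['A'])
  else if ((pvPositions.getD to_key (0,0)).1, (pvPositions.getD from_key (0,0)).2) = ((3:Int), (0:Int)) then
    PySem.List.pyRepeat [if dy > 0 then '>' else '<'] |dy| ++ (PySem.List.pyRepeat [if dx > 0 then 'v' else '^'] |dx| ++ ['A'])
  else if dy < 0 then
    PySem.List.pyRepeat [if dy > 0 then '>' else '<'] |dy| ++ (PySem.List.pyRepeat [if dx > 0 then 'v' else '^'] |dx| ++ ['A'])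
  else
    PySem.List.pyRepeat [if dx > 0 then 'v' else '^'] |dx| ++ (PySem.List.pyRepeat [if dy > 0 then '>' else '<'] |dy| ++ ['A'])

-- A's "count the number of moves required" loop (cache[(prev, c, depth-1)] is getD —
-- exact here because those keys are always present when A executes it)
def pvCountA (cache : PySem.Dict (Char × Char × Int) Int) (depth : Int) (sequence : List Char) : Int :=
  (sequence.foldl (fun (s : Int × Char) c => (s.1 + cache.getD (s.2, c, depth - 1) 0, c)) (0, 'A')).1

def pvCacheRobotMoves : PySem.Dict (Char × Char × Int) Int :=
  let cache := pvPositions.keys.foldl (fun cache x =>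
      pvPositions.keys.foldl (fun cache y => cache.insert (x, y, (0:Int)) 1) cache)
    PySem.Dict.empty
  (PySem.List.pyRange 1 27).foldl (fun cache depth =>
    pvPositions.keys.foldl (fun cache from_key =>
      pvPositions.keys.foldl (fun cache to_key =>
        cache.insert (from_key, to_key, depth) (pvCountA cache depth (pvSeqA from_key to_key))) cache) cache) cache

-- moves_cache[(prev, c, depth)] is getD (KeyError = key absent, excluded by Pre_);
-- int(code[:-1]) is ofStr? (none = ValueError, excluded by Pre_)
def solve (codes : List String) (depth : Int) : Int :=
  let moves_cache := pvCacheRobotMoves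
  codes.foldl (fun res code =>
    res + (code.toList.foldl (fun (s : Int × Char) c =>
             (s.1 + moves_cache.getD (s.2, c, depth) 0, c)) (0, 'A')).1
        * ((PySem.Int.ofStr? (PySem.Str.slice code none (some (-1)))).getD 0)) 0

-- ===== PORT B =====
-- the `seq` computed in B's cost (same dx/dy data, B's merged branch structure)
def pvSeqB (from_key to_key : Char) : List Char :=
  let p := pvPositions.getD from_key (0,0)
  let q := pvPositions.getD to_key (0,0)
  let dx : Int := q.1 - p.1
  let dy : Int := q.2 - p.2
  let vert := PySem.List.pyRepeat [if dx > 0 then 'v' else '^'] |dx|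
  let horiz := PySem.List.pyRepeat [if dy > 0 then '>' else '<'] |dy|
  if dx = 0 then horiz ++ ['A']
  else if dy = 0 ∨ (p.1, q.2) = ((3:Int), (0:Int)) then vert ++ horiz ++ ['A']
  else if (q.1, p.2) = ((3:Int), (0:Int)) ∨ dy < 0 then horiz ++ vert ++ ['A']
  else vert ++ horiz ++ ['A']

-- B's cost(from_key, to_key, depth, memo): top-down, memoized; the Python for-loop over seq
-- (threading the mutable memo) is the mutually recursive pvCostList. Python's int depth is
-- modelled as Nat (Pre_ gives 0 ≤ depth; B recurses depth-1 down to the depth == 0 base case).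
mutual
def pvCostB (f t : Char) (d : Nat) (memo : PySem.Dict (Char × Char × Nat) Int) :
    Int × PySem.Dict (Char × Char × Nat) Int :=
  match d with
  | 0 => (1, memo)
  | n + 1 =>
    match memo.get? (f, t, n + 1) with
    | some v => (v, memo)
    | none =>
      let r := pvCostList 'A' (pvSeqB f t) n 0 memo
      (r.1, r.2.insert (f, t, n + 1) r.1)
termination_by (d, 1, 0)

def pvCostList (prev : Char) (cs : List Char) (n : Nat) (total : Int)
    (memo : PySem.Dict (Char × Char × Nat) Int) : Int × PySem.Dict (Char × Char × Nat) Int :=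
  match cs with
  | [] => (total, memo)
  | c :: rest =>
    let r := pvCostB prev c n memo
    pvCostList c rest n (total + r.1) r.2
termination_by (n + 1, 0, cs.length)
end

def solve_alt (codes : List String) (depth : Int) : Int :=
  (codes.foldl (fun (s : Int × PySem.Dict (Char × Char × Nat) Int) code =>
    let r := pvCostList 'A' code.toList depth.toNat 0 s.2
    (s.1 + r.1 * ((PySem.Int.ofStr? (PySem.Str.slice code none (some (-1)))).getD 0), r.2))
    (0, PySem.Dict.empty)).1

-- ===== PRECONDITION & SPEC =====
def pvKeys : List Char := ['7','8','9','4','5','6','1','2','3','0','A','^','<','v','>']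

-- a code is well-formed when every character is a keypad key and code[:-1] is a nonempty digit string
def pvCodeOk (code : String) : Bool :=
  code.toList.all (fun c => pvKeys.contains c) &&
  !code.toList.dropLast.isEmpty && code.toList.dropLast.all Char.isDigit

-- Pre_ is exactly where A returns: every character of every code must be a keypad key
-- (else KeyError), code[:-1] must be a nonempty digit string (else int() raises ValueError),
-- and when any code is processed the depth must be one the 0..26 cache covers (else KeyError).
def Pre_solve (codes : List String) (depth : Int) : Prop :=
  (∀ code ∈ codes, pvCodeOk code = true) ∧ (codes ≠ [] → 0 ≤ depth ∧ depth ≤ 26)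
instance (codes : List String) (depth : Int) : Decidable (Pre_solve codes depth) := by
  unfold Pre_solve; infer_instance

def pvWitness_solve : List String × Int := (["029A"], 2)

def Spec_solve (codes : List String) (depth : Int) (out : Int) : Prop := out = solve_alt codes depth
instance (codes : List String) (depth : Int) (out : Int) : Decidable (Spec_solve codes depth out) := by unfold Spec_solve; infer_instance

-- ===== CLAIM (what is proved, stated in full; the proofs are below) =====
def Claim_equal_solve : Prop := ∀ (codes : List String) (depth : Int), Dom_solve codes depth → Pre_solve codes depth → Spec_solve codes depth (solve codes depth)

-- ===== LEMMAS AND PROOFS =====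

lemma pvCodeOk_mem {code : String} (h : pvCodeOk code = true) : ∀ c ∈ code.toList, c ∈ pvKeys := by
  unfold pvCodeOk at h
  simp only [Bool.and_eq_true, List.all_eq_true] at h
  intro c hc
  simpa using h.1.1 c hc

-- the plain (unmemoized) value of B's cost: the specification both ports are related to
def pvCostSpec : Nat → Char → Char → Int
  | 0, _, _ => 1
  | n + 1, f, t =>
    ((('A' :: pvSeqB f t).zip (pvSeqB f t)).map (fun p => pvCostSpec n p.1 p.2)).sum

-- the body of A's depth loop and its initial table, named for the proofs
def pvStep (cache : PySem.Dict (Char × Char × Int) Int) (depth : Int) :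
    PySem.Dict (Char × Char × Int) Int :=
  pvPositions.keys.foldl (fun cache from_key =>
    pvPositions.keys.foldl (fun cache to_key =>
      cache.insert (from_key, to_key, depth) (pvCountA cache depth (pvSeqA from_key to_key))) cache) cache

def pvBase : PySem.Dict (Char × Char × Int) Int :=
  pvPositions.keys.foldl (fun cache x =>
    pvPositions.keys.foldl (fun cache y => cache.insert (x, y, (0:Int)) 1) cache)
    PySem.Dict.empty

-- A's cache after the depth loop has run up to depth n
def pvBuildTo (n : Nat) : PySem.Dict (Char × Char × Int) Int :=
  (PySem.List.pyRange 1 ((n : Int) + 1)).foldl pvStep pvBase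

lemma pvCache_eq_buildTo : pvCacheRobotMoves = pvBuildTo 26 := by
  have h : ((26:Nat):Int) + 1 = 27 := by norm_num
  unfold pvBuildTo pvStep pvBase
  rw [h]
  rfl

lemma pvKeys_eq : pvPositions.keys = pvKeys := by decide

lemma pvKeys_nodup : pvKeys.Nodup := by decide

-- A's six-branch sequence and B's four-branch sequence coincide for every pair of characters
-- (A's dy == 0 branch omits an empty horizontal segment which B appends explicitly)
lemma pvSeq_eq (f t : Char) : pvSeqA f t = pvSeqB f t := by
  unfold pvSeqA pvSeqB
  generalize pvPositions.getD f (0,0) = p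
  generalize pvPositions.getD t (0,0) = q
  simp only [PySem.List.pyRepeat_singleton, Prod.mk.injEq]
  split_ifs <;>
    first
      | rfl
      | (exfalso; omega)
      | simp_all [List.append_assoc]

-- every character B's sequences contain is a keypad key
lemma pvSeqB_mem (f t : Char) : ∀ c ∈ pvSeqB f t, c ∈ pvKeys := by
  intro c hc
  unfold pvSeqB at hc
  simp only [PySem.List.pyRepeat_singleton] at hc
  have h5 : c = '^' ∨ c = 'v' ∨ c = '<' ∨ c = '>' ∨ c = 'A' := by
    split_ifs at hc <;>
      simp only [List.mem_append, List.mem_replicate, List.mem_singleton] at hc <;> tauto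
  rcases h5 with rfl | rfl | rfl | rfl | rfl <;> decide

-- a dict–agreement relation: same lookups away from the depth being written
def pvAgree (dep : Int) (c c' : PySem.Dict (Char × Char × Int) Int) : Prop :=
  ∀ k : Char × Char × Int, k.2.2 ≠ dep → c.getD k 0 = c'.getD k 0

lemma pvFoldl_pair_sum (g : Char → Char → Int) :
    ∀ (cs : List Char) (acc : Int) (prev : Char),
      (cs.foldl (fun (s : Int × Char) c => (s.1 + g s.2 c, c)) (acc, prev)).1 =
        acc + (((prev :: cs).zip cs).map (fun p => g p.1 p.2)).sum := by
  intro cs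
  induction cs with
  | nil => intro acc prev; simp
  | cons c rest ih =>
    intro acc prev
    simp only [List.foldl_cons, List.zip_cons_cons, List.map_cons, List.sum_cons]
    rw [ih]
    ring

lemma pvCountA_eq (c : PySem.Dict (Char × Char × Int) Int) (dep : Int) (s : List Char) :
    pvCountA c dep s =
      ((('A' :: s).zip s).map (fun p => c.getD (p.1, p.2, dep - 1) 0)).sum := by
  unfold pvCountA
  rw [pvFoldl_pair_sum (fun a b => c.getD (a, b, dep - 1) 0)]
  ring

-- pvCountA only reads the cache at depth dep - 1, so it respects pvAgree
lemma pvCountA_congr (dep : Int) (c c' : PySem.Dict (Char × Char × Int) Int)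
    (h : pvAgree dep c c') (s : List Char) : pvCountA c dep s = pvCountA c' dep s := by
  rw [pvCountA_eq, pvCountA_eq]
  refine congrArg _ (List.map_congr_left ?_)
  intro p _
  exact h (p.1, p.2, dep - 1) (by show dep - 1 ≠ dep; omega)

-- the inner to_key loop does not change lookups at keys it does not insert
lemma pvInner_getD_ne (dep : Int) (f : Char)
    (val : PySem.Dict (Char × Char × Int) Int → Char → Int) :
    ∀ (ts : List Char) (c : PySem.Dict (Char × Char × Int) Int) (k : Char × Char × Int),
      (∀ t ∈ ts, k ≠ (f, t, dep)) →
      (ts.foldl (fun c t => c.insert (f, t, dep) (val c t)) c).getD k 0 = c.getD k 0 := by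
  intro ts
  induction ts with
  | nil => intro c k _; rfl
  | cons t rest ih =>
    intro c k hk
    simp only [List.foldl_cons]
    rw [ih _ _ (fun t' ht' => hk t' (List.mem_cons_of_mem _ ht'))]
    exact PySem.Dict.getD_insert_of_ne _ _ _ (hk t (List.mem_cons_self ..))

-- likewise for the whole double loop
lemma pvOuter_getD_ne (dep : Int) (ts0 : List Char)
    (val : PySem.Dict (Char × Char × Int) Int → Char → Char → Int) :
    ∀ (fs : List Char) (c : PySem.Dict (Char × Char × Int) Int) (k : Char × Char × Int),
      (∀ f ∈ fs, ∀ t ∈ ts0, k ≠ (f, t, dep)) →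
      (fs.foldl (fun c f => ts0.foldl (fun c t => c.insert (f, t, dep) (val c f t)) c) c).getD k 0 =
        c.getD k 0 := by
  intro fs
  induction fs with
  | nil => intro c k _; rfl
  | cons f rest ih =>
    intro c k hk
    simp only [List.foldl_cons]
    rw [ih _ _ (fun u hu v hv => hk u (List.mem_cons_of_mem _ hu) v hv)]
    exact pvInner_getD_ne dep f (fun c t => val c f t) ts0 c k
      (fun t ht => hk f (List.mem_cons_self ..) t ht)

lemma pvStep_getD_ne (dep : Int) (c : PySem.Dict (Char × Char × Int) Int)
    (k : Char × Char × Int) (hk : k.2.2 ≠ dep) : (pvStep c dep).getD k 0 = c.getD k 0 := by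
  unfold pvStep
  exact pvOuter_getD_ne dep _ _ _ c k (fun f _ t _ he => hk (by rw [he]))

-- the value the inner loop stores at (f, t, dep): computed from any pvAgree-equivalent cache
lemma pvInner_getD_set (dep : Int) (f : Char)
    (val : PySem.Dict (Char × Char × Int) Int → Char → Int)
    (c0 : PySem.Dict (Char × Char × Int) Int)
    (hval : ∀ c, pvAgree dep c c0 → ∀ t, val c t = val c0 t) :
    ∀ (ts : List Char) (c : PySem.Dict (Char × Char × Int) Int), ts.Nodup →
      pvAgree dep c c0 → ∀ t ∈ ts,
      (ts.foldl (fun c t => c.insert (f, t, dep) (val c t)) c).getD (f, t, dep) 0 = val c0 t := by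
  intro ts
  induction ts with
  | nil => intro c _ _ t ht; exact absurd ht (List.not_mem_nil)
  | cons t' rest ih =>
    intro c hnd hag t ht
    simp only [List.foldl_cons]
    rcases List.mem_cons.mp ht with rfl | htr
    · rw [pvInner_getD_ne dep f val rest _ _
        (fun u hu he => ((List.nodup_cons.mp hnd).1 (by injection he with _ h; injection h with h _; rw [h]; exact hu)))]
      rw [PySem.Dict.getD_insert_self]
      exact hval c hag t
    · exact ih _ ((List.nodup_cons.mp hnd).2)
        (fun k hk => by
          rw [PySem.Dict.getD_insert_of_ne _ _ _ (fun he => hk (by rw [he]))]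
          exact hag k hk) t htr

lemma pvOuter_getD_set (dep : Int) (ts0 : List Char) (hts0 : ts0.Nodup)
    (val : PySem.Dict (Char × Char × Int) Int → Char → Char → Int)
    (c0 : PySem.Dict (Char × Char × Int) Int)
    (hval : ∀ c, pvAgree dep c c0 → ∀ f t, val c f t = val c0 f t) :
    ∀ (fs : List Char) (c : PySem.Dict (Char × Char × Int) Int), fs.Nodup →
      pvAgree dep c c0 → ∀ f ∈ fs, ∀ t ∈ ts0,
      (fs.foldl (fun c f => ts0.foldl (fun c t => c.insert (f, t, dep) (val c f t)) c) c).getD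
          (f, t, dep) 0 = val c0 f t := by
  intro fs
  induction fs with
  | nil => intro c _ _ f hf; exact absurd hf (List.not_mem_nil)
  | cons f' rest ih =>
    intro c hnd hag f hf t ht
    simp only [List.foldl_cons]
    rcases List.mem_cons.mp hf with rfl | hfr
    · have hne : ∀ u ∈ rest, ∀ v ∈ ts0, ((f, t, dep) : Char × Char × Int) ≠ (u, v, dep) := by
        intro u hu v _ he
        injection he with h _
        subst h
        exact (List.nodup_cons.mp hnd).1 hu
      rw [pvOuter_getD_ne dep ts0 val rest _ _ hne]
      exact pvInner_getD_set dep f (fun c t => val c f t) c0 (fun c hc t => hval c hc f t)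
        ts0 c hts0 hag t ht
    · refine ih _ ((List.nodup_cons.mp hnd).2) (fun k hk => ?_) f hfr t ht
      rw [pvInner_getD_ne dep f' (fun c t => val c f' t) ts0 c k (fun u _ hu => hk (by rw [hu]))]
      exact hag k hk

lemma pvStep_getD_set (dep : Int) (c : PySem.Dict (Char × Char × Int) Int)
    (f t : Char) (hf : f ∈ pvKeys) (ht : t ∈ pvKeys) :
    (pvStep c dep).getD (f, t, dep) 0 = pvCountA c dep (pvSeqA f t) := by
  unfold pvStep
  rw [pvKeys_eq]
  exact pvOuter_getD_set dep pvKeys pvKeys_nodup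
    (fun c f t => pvCountA c dep (pvSeqA f t)) c
    (fun c' hc' f' t' => pvCountA_congr dep c' c hc' _)
    pvKeys c pvKeys_nodup (fun _ _ => rfl) f hf t ht

-- lookups in A's initial depth-0 table
lemma pvBase_inner_getD (x : Char) :
    ∀ (ts : List Char) (c : PySem.Dict (Char × Char × Int) Int) (k : Char × Char × Int),
      (ts.foldl (fun c y => c.insert (x, y, (0:Int)) 1) c).getD k 0 =
        if k.1 = x ∧ k.2.2 = 0 ∧ k.2.1 ∈ ts then 1 else c.getD k 0 := by
  intro ts
  induction ts with
  | nil => intro c k; simp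
  | cons y rest ih =>
    intro c k
    simp only [List.foldl_cons]
    rw [ih]
    by_cases h1 : k.1 = x ∧ k.2.2 = 0 ∧ k.2.1 ∈ rest
    · simp [h1, List.mem_cons]
    · rw [if_neg h1]
      by_cases h2 : k = (x, y, (0:Int))
      · subst h2; rw [PySem.Dict.getD_insert_self]; simp [List.mem_cons]
      · rw [PySem.Dict.getD_insert_of_ne _ _ _ h2]
        rw [if_neg]
        intro ⟨ha, hb, hc⟩
        rcases List.mem_cons.mp hc with he | he
        · exact h2 (by obtain ⟨k1, k2, k3⟩ := k; simp_all)
        · exact h1 ⟨ha, hb, he⟩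

lemma pvBase_getD (f t : Char) (hf : f ∈ pvKeys) (ht : t ∈ pvKeys) :
    pvBase.getD (f, t, (0:Int)) 0 = 1 := by
  unfold pvBase
  rw [pvKeys_eq]
  have : ∀ (fs : List Char) (c : PySem.Dict (Char × Char × Int) Int),
      (fs.foldl (fun c x => pvKeys.foldl (fun c y => c.insert (x, y, (0:Int)) 1) c) c).getD
          (f, t, (0:Int)) 0 =
        if f ∈ fs ∧ t ∈ pvKeys then 1 else c.getD (f, t, (0:Int)) 0 := by
    intro fs
    induction fs with
    | nil => intro c; simp
    | cons x rest ih =>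
      intro c
      simp only [List.foldl_cons]
      rw [ih]
      by_cases h1 : f ∈ rest ∧ t ∈ pvKeys
      · simp [h1, List.mem_cons]
      · rw [if_neg h1, pvBase_inner_getD]
        simp only [List.mem_cons]
        by_cases h2 : f = x ∧ t ∈ pvKeys
        · simp [h2]
        · rw [if_neg (by simpa using h2), if_neg (by tauto)]
  rw [this, if_pos ⟨hf, ht⟩]

-- the heart of the file: A's table agrees with B's recursion at every depth it contains
lemma pvBuildTo_getD : ∀ (n : Nat) (d : Nat), d ≤ n → ∀ f ∈ pvKeys, ∀ t ∈ pvKeys,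
    (pvBuildTo n).getD (f, t, (d : Int)) 0 = pvCostSpec d f t := by
  intro n
  induction n with
  | zero =>
    intro d hd f hf t ht
    interval_cases d
    have h0 : pvBuildTo 0 = pvBase := by
      unfold pvBuildTo
      norm_num [PySem.List.pyRange]
    rw [h0]
    exact pvBase_getD f t hf ht
  | succ n ih =>
    intro d hd f hf t ht
    have hsplit : pvBuildTo (n+1) = pvStep (pvBuildTo n) ((n:Int) + 1) := by
      unfold pvBuildTo
      rw [show ((n+1:Nat):Int) + 1 = ((n:Int) + 1) + 1 by push_cast; ring,
          PySem.List.pyRange_one_succ_right (by omega), List.foldl_append]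
      simp
    rw [hsplit]
    by_cases hcase : d = n + 1
    · subst hcase
      rw [show ((n+1:Nat):Int) = (n:Int) + 1 by push_cast; ring]
      rw [pvStep_getD_set _ _ _ _ hf ht, pvCountA_eq, pvSeq_eq]
      show _ = pvCostSpec (n+1) f t
      unfold pvCostSpec
      refine congrArg _ (List.map_congr_left ?_)
      intro p hp
      obtain ⟨p1, p2⟩ := p
      obtain ⟨h1, h2⟩ := List.of_mem_zip hp
      have hp1 : p1 ∈ pvKeys := by
        rcases List.mem_cons.mp h1 with rfl | h1
        · decide
        · exact pvSeqB_mem f t _ h1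
      have hp2 : p2 ∈ pvKeys := pvSeqB_mem f t _ h2
      have : ((n:Int) + 1) - 1 = ((n:Nat):Int) := by ring
      rw [this]
      exact ih n le_rfl p1 hp1 p2 hp2
    · have hdn : d ≤ n := by omega
      rw [pvStep_getD_ne _ _ _ (by simp; omega)]
      exact ih d hdn f hf t ht

lemma pvCache_getD (d : Nat) (hd : d ≤ 26) (f : Char) (hf : f ∈ pvKeys)
    (t : Char) (ht : t ∈ pvKeys) :
    pvCacheRobotMoves.getD (f, t, (d : Int)) 0 = pvCostSpec d f t := by
  rw [pvCache_eq_buildTo]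
  exact pvBuildTo_getD 26 d hd f hf t ht

-- memoization invariant: every entry of B's memo is the unmemoized value
def pvValid (m : PySem.Dict (Char × Char × Nat) Int) : Prop :=
  ∀ (f t : Char) (n : Nat) (v : Int), m.get? (f, t, n) = some v → v = pvCostSpec n f t

lemma pvCostList_correct (d : Nat)
    (hB : ∀ (f t : Char) (m : PySem.Dict (Char × Char × Nat) Int),
       pvValid m → (pvCostB f t d m).1 = pvCostSpec d f t ∧ pvValid (pvCostB f t d m).2) :
    ∀ (cs : List Char) (prev : Char) (acc : Int) (m : PySem.Dict (Char × Char × Nat) Int),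
      pvValid m →
      (pvCostList prev cs d acc m).1 =
          acc + (((prev :: cs).zip cs).map (fun p => pvCostSpec d p.1 p.2)).sum ∧
        pvValid (pvCostList prev cs d acc m).2 := by
  intro cs
  induction cs with
  | nil => intro prev acc m hm; simp [pvCostList]; exact hm
  | cons c rest ih =>
    intro prev acc m hm
    rw [pvCostList]
    obtain ⟨h1, h2⟩ := hB prev c m hm
    obtain ⟨h3, h4⟩ := ih c (acc + (pvCostB prev c d m).1) (pvCostB prev c d m).2 h2
    refine ⟨?_, h4⟩
    rw [h3, h1]
    simp only [List.zip_cons_cons, List.map_cons, List.sum_cons]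
    ring

lemma pvCostB_correct : ∀ (d : Nat) (f t : Char) (m : PySem.Dict (Char × Char × Nat) Int),
    pvValid m → (pvCostB f t d m).1 = pvCostSpec d f t ∧ pvValid (pvCostB f t d m).2 := by
  intro d
  induction d with
  | zero => intro f t m hm; rw [pvCostB]; exact ⟨rfl, hm⟩
  | succ n ih =>
    intro f t m hm
    rw [pvCostB]
    cases hg : m.get? (f, t, n + 1) with
    | some v =>
      simpa using ⟨hm f t (n+1) v hg, hm⟩
    | none =>
      simp only
      obtain ⟨h1, h2⟩ := pvCostList_correct n ih (pvSeqB f t) 'A' 0 m hm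
      have hv : (pvCostList 'A' (pvSeqB f t) n 0 m).1 = pvCostSpec (n+1) f t := by
        rw [h1]; rw [pvCostSpec]; ring
      refine ⟨hv, ?_⟩
      intro f' t' n' v hget
      rw [PySem.Dict.get?_insert] at hget
      split_ifs at hget with hk
      · injection hk with a b
        injection b with c' d'
        subst a; subst c'; subst d'
        injection hget with he
        rw [← he]; exact hv
      · exact h2 f' t' n' v hget

-- ===== VERDICT (by name: the statement is the Claim_ definition above) =====
theorem solve_spec : Claim_equal_solve := by
  intro codes depth _ hpre
  unfold Spec_solve solve solve_alt
  cases codes with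
  | nil => rfl
  | cons code0 rest0 =>
    obtain ⟨hcodes, hdepth⟩ := hpre
    obtain ⟨h0, h26⟩ := hdepth (by simp)
    have hdn : ((depth.toNat : Nat) : Int) = depth := Int.toNat_of_nonneg h0
    have hcache : ∀ p1 p2, p1 ∈ pvKeys → p2 ∈ pvKeys →
        pvCacheRobotMoves.getD (p1, p2, depth) 0 = pvCostSpec depth.toNat p1 p2 := by
      intro p1 p2 hp1 hp2
      rw [← hdn]
      exact pvCache_getD depth.toNat (by omega) p1 hp1 p2 hp2
    have main : ∀ (C : PySem.Dict (Char × Char × Int) Int),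
        (∀ p1 p2, p1 ∈ pvKeys → p2 ∈ pvKeys →
          C.getD (p1, p2, depth) 0 = pvCostSpec depth.toNat p1 p2) →
        ∀ (cs : List String), (∀ code ∈ cs, ∀ c ∈ code.toList, c ∈ pvKeys) →
        ∀ (acc : Int) (m : PySem.Dict (Char × Char × Nat) Int), pvValid m →
        (cs.foldl (fun (s : Int × PySem.Dict (Char × Char × Nat) Int) code =>
            let r := pvCostList 'A' code.toList depth.toNat 0 s.2
            (s.1 + r.1 * ((PySem.Int.ofStr? (PySem.Str.slice code none (some (-1)))).getD 0),
              r.2)) (acc, m)).1 =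
          cs.foldl (fun res code =>
            res + (code.toList.foldl (fun (s : Int × Char) c =>
                (s.1 + C.getD (s.2, c, depth) 0, c)) (0, 'A')).1 *
              ((PySem.Int.ofStr? (PySem.Str.slice code none (some (-1)))).getD 0)) acc := by
      intro C hC cs
      induction cs with
      | nil => intro _ acc m _; rfl
      | cons code rest ih =>
        intro hcs acc m hm
        obtain ⟨h1, h2⟩ := pvCostList_correct depth.toNat
          (pvCostB_correct depth.toNat) code.toList 'A' 0 m hm
        have hcount : (pvCostList 'A' code.toList depth.toNat 0 m).1 =
            (code.toList.foldl (fun (s : Int × Char) c =>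
              (s.1 + C.getD (s.2, c, depth) 0, c)) (0, 'A')).1 := by
          rw [h1, pvFoldl_pair_sum (fun a b => C.getD (a, b, depth) 0)]
          simp only [zero_add]
          refine congrArg _ (List.map_congr_left ?_)
          intro p hp
          obtain ⟨p1, p2⟩ := p
          obtain ⟨hm1, hm2⟩ := List.of_mem_zip hp
          have hk1 : p1 ∈ pvKeys := by
            rcases List.mem_cons.mp hm1 with rfl | h
            · decide
            · exact hcs code (List.mem_cons_self ..) _ h
          have hk2 : p2 ∈ pvKeys := hcs code (List.mem_cons_self ..) _ hm2
          exact (hC p1 p2 hk1 hk2).symm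
        simp only [List.foldl_cons]
        rw [ih (fun c hc => hcs c (List.mem_cons_of_mem _ hc)) _ _ h2, hcount]
    exact (main pvCacheRobotMoves hcache (code0 :: rest0) (fun code hc => pvCodeOk_mem (hcodes code hc)) 0
      PySem.Dict.empty (fun _ _ _ _ h => by simp [PySem.Dict.get?, PySem.Dict.empty] at h)).symm
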